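-- pv_equiv track=rewrite | github.com/zachweisman0105/OpenDentalQueryTool | src/opendental_query/utils/sql_parser.py | _find_top_level_order_by_index
-- ===== SOURCE A (Python) =====
-- def _find_top_level_order_by_index(query: str) -> int:
--     """Find index of top-level 'order by' (depth 0), or -1 if none."""
--     lower = query.lower()
--     depth = 0
--     last_idx = -1
--     i = 0
--     while i < len(lower):
--         c = lower[i]
--         if c == "(":
--             depth += 1
--         elif c == ")":
--             depth = max(0, depth - 1)
--         elif depth == 0 and lower.startswith("order by", i):
--             last_idx = i
--         i += 1
--     return last_idx
-- ===== SOURCE B (Python) =====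
-- def _find_top_level_order_by_index(query: str) -> int:
--     """Two-pass: build a table of pre-character paren depths, then search it."""
--     lower = query.lower()
--     depths = []
--     d = 0
--     for c in lower:
--         depths.append(d)
--         if c == "(":
--             d += 1
--         elif c == ")":
--             d = max(0, d - 1)
--     last = -1
--     for i, dep in enumerate(depths):
--         if dep == 0 and lower.startswith("order by", i):
--             last = i
--     return last
-- ===== Notes on version B (the rewrite author's own statement) =====
-- stated objective: alternative
-- what changed: Replaces A's single interleaved scan (depth update and match test in one loop with elif short-circuiting) by a table-build-then-search decomposition: one pass builds the clamped pre-character depth table, a second pass keeps the last position with depth 0 that matches 'order by'.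
import Mathlib
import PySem

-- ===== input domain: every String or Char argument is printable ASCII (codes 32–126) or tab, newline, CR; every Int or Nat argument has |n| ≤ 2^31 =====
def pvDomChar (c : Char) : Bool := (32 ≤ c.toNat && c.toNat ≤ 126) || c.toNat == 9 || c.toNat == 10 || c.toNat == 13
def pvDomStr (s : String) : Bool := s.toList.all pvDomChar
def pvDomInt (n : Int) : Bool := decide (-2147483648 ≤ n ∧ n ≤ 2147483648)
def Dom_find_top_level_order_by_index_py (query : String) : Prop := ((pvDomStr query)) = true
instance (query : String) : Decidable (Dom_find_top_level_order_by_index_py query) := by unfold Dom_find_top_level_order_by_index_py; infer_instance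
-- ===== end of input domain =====

-- B replaces A's single interleaved scan by a depth-table-build-then-search decomposition (alternative, same cost).

-- ===== PORT A =====
-- the searched literal "order by"
def pvObPat : List Char := ['o', 'r', 'd', 'e', 'r', ' ', 'b', 'y']

-- A's while-loop over i transcribed as recursion on the suffix lower[i:]; the current
-- character c = lower[i] is the suffix's head, and lower.startswith("order by", i) is
-- exactly pvObPat.isPrefixOf (that suffix) — exact for 0 ≤ i < len(lower).
def pvLoopA : List Char → Int → Int → Int → Int
  | [], _, _, last => last
  | c :: rest, i, depth, last =>
    if c = '(' then pvLoopA rest (i + 1) (depth + 1) last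
    else if c = ')' then pvLoopA rest (i + 1) (max 0 (depth - 1)) last
    else if depth = 0 ∧ pvObPat.isPrefixOf (c :: rest) then pvLoopA rest (i + 1) depth i
    else pvLoopA rest (i + 1) depth last

def find_top_level_order_by_index_py (query : String) : Int :=
  pvLoopA (PySem.Chars.lower query.toList) 0 0 (-1)

-- ===== PORT B =====
-- pass 1 of Source B: the table of clamped parenthesis depths just BEFORE each character
def pvDepths : List Char → Int → List Int
  | [], _ => []
  | c :: rest, d =>
    d :: pvDepths rest (if c = '(' then d + 1 else if c = ')' then max 0 (d - 1) else d)

-- pass 2 of Source B: walk positions with their tabled depth, keeping the last match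
-- (startswith at i again read off the suffix, exactly as in port A)
def pvSearchB : List Char → List Int → Int → Int → Int
  | c :: rest, dep :: ds, i, last =>
    pvSearchB rest ds (i + 1)
      (if dep = 0 ∧ pvObPat.isPrefixOf (c :: rest) then i else last)
  | _, _, _, last => last

def find_top_level_order_by_index_py_alt (query : String) : Int :=
  let lower := PySem.Chars.lower query.toList
  pvSearchB lower (pvDepths lower 0) 0 (-1)

-- ===== PRECONDITION & SPEC =====
def Spec_find_top_level_order_by_index_py (query : String) (out : Int) : Prop := out = find_top_level_order_by_index_py_alt query
instance (query : String) (out : Int) : Decidable (Spec_find_top_level_order_by_index_py query out) := by unfold Spec_find_top_level_order_by_index_py; infer_instance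

-- ===== CLAIM (what is proved, stated in full; the proofs are below) =====
def Claim_equal_find_top_level_order_by_index_py : Prop := ∀ (query : String), Dom_find_top_level_order_by_index_py query → Spec_find_top_level_order_by_index_py query (find_top_level_order_by_index_py query)

-- ===== LEMMAS AND PROOFS =====

-- the pattern starts with 'o', so a suffix headed by a parenthesis never matches
theorem pvObPat_not_prefix_paren (c : Char) (rest : List Char) (h : c = '(' ∨ c = ')') :
    pvObPat.isPrefixOf (c :: rest) = false := by
  rcases h with h | h <;> subst h <;> simp [pvObPat, List.isPrefixOf]

theorem pvLoopA_eq_search (cs : List Char) :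
    ∀ (i d last : Int), pvLoopA cs i d last = pvSearchB cs (pvDepths cs d) i last := by
  induction cs with
  | nil => intro i d last; rfl
  | cons c rest ih =>
    intro i d last
    by_cases h1 : c = '('
    · subst h1
      simp [pvLoopA, pvDepths, pvSearchB, pvObPat_not_prefix_paren '(' rest (Or.inl rfl), ih]
    · by_cases h2 : c = ')'
      · subst h2
        simp [pvLoopA, pvDepths, pvSearchB, pvObPat_not_prefix_paren ')' rest (Or.inr rfl), ih]
      · simp [pvLoopA, pvDepths, pvSearchB, h1, h2, ih]
        by_cases h3 : d = 0 ∧ pvObPat <+: (c :: rest) <;> simp [h3]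

-- ===== VERDICT (by name: the statement is the Claim_ definition above) =====
theorem find_top_level_order_by_index_py_spec : Claim_equal_find_top_level_order_by_index_py := by
  intro query _
  unfold Spec_find_top_level_order_by_index_py find_top_level_order_by_index_py
    find_top_level_order_by_index_py_alt
  exact pvLoopA_eq_search _ 0 0 (-1)
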